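-- pv_equiv track=rewrite | github.com/Mohaedbashir45/python-week-1-code-challenge | solution3.py | solution
-- ===== SOURCE A (Python) =====
-- def solution(N):
--     alphabet = 'abcdefghijklmnopqrstuvwxyz'
--     result = ''
--     i = 0
--     while len(result) < N:
--         result += alphabet[i] * (N // 26 + (i < N % 26))
--         i += 1
--     return result[:N]
-- ===== SOURCE B (Python) =====
-- def solution(N):
--     alphabet = 'abcdefghijklmnopqrstuvwxyz'
--     n = max(N, 0)
--     q = n // 26
--     r = n % 26
--     return ''.join(sorted(alphabet * q + alphabet[:r]))
-- ===== Notes on version B (the rewrite author's own statement) =====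
-- stated objective: simpler
-- what changed: Replaces the while-loop that appends per-letter blocks until the length bound is met (plus a final slice) by a closed-form multiset construction: alphabet*(n//26) + alphabet[:n%26], regrouped alphabetically with one sort.
import Mathlib
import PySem

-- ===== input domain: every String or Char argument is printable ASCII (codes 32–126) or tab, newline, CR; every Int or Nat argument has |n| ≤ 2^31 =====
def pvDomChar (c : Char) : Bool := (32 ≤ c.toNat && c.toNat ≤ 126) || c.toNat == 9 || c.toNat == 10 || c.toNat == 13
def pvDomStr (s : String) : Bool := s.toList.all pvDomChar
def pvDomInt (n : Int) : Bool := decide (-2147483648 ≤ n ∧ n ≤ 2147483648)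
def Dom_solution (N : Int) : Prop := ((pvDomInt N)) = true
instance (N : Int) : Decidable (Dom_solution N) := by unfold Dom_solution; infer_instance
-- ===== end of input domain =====

-- B replaces A's length-bounded while-loop (append per-letter blocks, then slice)
-- by a closed-form multiset alphabet*(n//26) + alphabet[:n%26], regrouped with one sort (objective: simpler).

-- ===== PORT A =====
-- the 26 letters, shared literal
def pvAlpha : List Char := "abcdefghijklmnopqrstuvwxyz".toList

-- A's while-loop; `fuel` only makes the recursion structural (the loop itself runs at
-- most 26 iterations from the initial state, so fuel 27 is never exhausted).
def solutionLoop (N : Int) (fuel : Nat) (result : List Char) (i : Int) : List Char :=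
  match fuel with
  | 0 => result
  | f + 1 =>
    if (result.length : Int) < N then
      match PySem.List.pyGet? pvAlpha i with
      | some c =>
          solutionLoop N f
            (result ++ List.replicate
              (PySem.Int.floordiv N 26 + (if i < PySem.Int.mod N 26 then 1 else 0)).toNat c)
            (i + 1)
      | none => result   -- IndexError (unreachable from the initial state)
    else result

def solution (N : Int) : String :=
  String.ofList (PySem.List.slice (solutionLoop N 27 [] 0) none (some N))

-- ===== PORT B =====
def solution_alt (N : Int) : String :=
  let n : Int := max N 0
  let q : Int := PySem.Int.floordiv n 26
  let r : Int := PySem.Int.mod n 26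
  let base : List Char := (List.replicate q.toNat pvAlpha).flatten ++ PySem.List.slice pvAlpha none (some r)
  String.ofList (PySem.List.sorted base (fun c => c) false)

-- ===== PRECONDITION & SPEC =====
def Spec_solution (N : Int) (out : String) : Prop := out = solution_alt N
instance (N : Int) (out : String) : Decidable (Spec_solution N out) := by unfold Spec_solution; infer_instance

-- ===== CLAIM (what is proved, stated in full; the proofs are below) =====
def Claim_equal_solution : Prop := ∀ (N : Int), Dom_solution N → Spec_solution N (solution N)

-- ===== LEMMAS AND PROOFS =====

-- the grouped string: for each remaining letter c, q copies plus one more while r > 0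
def tailG (cs : List Char) (q r : Nat) : List Char :=
  match cs with
  | [] => []
  | c :: cs' => List.replicate (q + if 0 < r then 1 else 0) c ++ tailG cs' q (r - 1)

theorem tailG_length (cs : List Char) (q : Nat) : ∀ r, (tailG cs q r).length = cs.length * q + min r cs.length := by
  induction cs with
  | nil => intro r; simp [tailG]
  | cons c cs ih =>
    intro r
    simp only [tailG, List.length_append, List.length_replicate, ih (r - 1), List.length_cons]
    have hm : (cs.length + 1) * q = cs.length * q + q := by ring
    rw [hm]
    split_ifs with h <;> omega

theorem tailG_mem (cs : List Char) (q : Nat) : ∀ r x, x ∈ tailG cs q r → x ∈ cs := by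
  induction cs with
  | nil => intro r x h; simp [tailG] at h
  | cons c cs ih =>
    intro r x h
    simp only [tailG, List.mem_append, List.mem_replicate] at h
    rcases h with h | h
    · simp [h.2]
    · exact List.mem_cons_of_mem _ (ih (r - 1) x h)

theorem tailG_pairwise (cs : List Char) (q : Nat) (hcs : cs.Pairwise (· < ·)) :
    ∀ r, (tailG cs q r).Pairwise (· ≤ ·) := by
  induction cs with
  | nil => intro r; simp [tailG]
  | cons c cs ih =>
    intro r
    rcases List.pairwise_cons.mp hcs with ⟨hlt, htail⟩
    simp only [tailG]
    apply List.pairwise_append.mpr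
    refine ⟨?_, ih htail (r - 1), ?_⟩
    · exact List.pairwise_replicate.mpr (Or.inr le_rfl)
    · intro a ha b hb
      rcases (List.mem_replicate.mp ha) with ⟨_, rfl⟩
      exact le_of_lt (hlt _ (tailG_mem cs q (r - 1) b hb))

theorem flatten_replicate_cons_perm (q : Nat) (c : Char) (cs : List Char) :
    (List.replicate q (c :: cs)).flatten.Perm (List.replicate q c ++ (List.replicate q cs).flatten) := by
  induction q with
  | zero => simp
  | succ q ih =>
    simp only [List.replicate_succ, List.flatten_cons, List.cons_append]
    refine List.Perm.cons c ?_
    refine List.Perm.trans (ih.append_left cs) ?_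
    rw [← List.append_assoc, ← List.append_assoc]
    exact List.perm_append_comm.append_right _

theorem tailG_perm (cs : List Char) (q : Nat) :
    ∀ r, (tailG cs q r).Perm ((List.replicate q cs).flatten ++ cs.take r) := by
  induction cs with
  | nil => intro r; simp [tailG]
  | cons c cs ih =>
    intro r
    refine List.Perm.trans ?_ ((flatten_replicate_cons_perm q c cs).symm.append_right _)
    simp only [tailG]
    cases r with
    | zero =>
      rw [if_neg (lt_irrefl 0), Nat.add_zero, List.take_zero, List.append_nil]
      have h := (ih 0).append_left (List.replicate q c)
      rw [List.take_zero, List.append_nil] at h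
      exact h
    | succ r' =>
      rw [if_pos (Nat.succ_pos r'), Nat.succ_sub_one, List.take_succ_cons]
      have h1 : (List.replicate (q + 1) c ++ tailG cs q r').Perm
          (List.replicate q c ++ ([c] ++ ((List.replicate q cs).flatten ++ cs.take r'))) := by
        rw [List.replicate_succ', List.append_assoc]
        exact ((ih r').append_left _).append_left _
      refine h1.trans ?_
      have h2 : ([c] ++ ((List.replicate q cs).flatten ++ cs.take r')).Perm
          ((List.replicate q cs).flatten ++ ([c] ++ cs.take r')) := by
        rw [← List.append_assoc, ← List.append_assoc]
        exact List.perm_append_comm.append_right _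
      have h3 := h2.append_left (List.replicate q c)
      refine h3.trans ?_
      rw [← List.append_assoc]
      simp

-- In-loop invariant: with N = 26*q + r (0 ≤ r < 26), from a state of length i*q + min i r
-- with i ≤ 26 and fuel ≥ 27 - i, the loop returns result ++ tailG (pvAlpha.drop i) q (r - i).
theorem loop_invariant (q r : Nat) (hr : r < 26) :
    ∀ (j i : Nat), i + j = 26 → ∀ (result : List Char) (fuel : Nat), 27 - i ≤ fuel →
      result.length = i * q + min i r →
      solutionLoop ((26 * q + r : Nat) : Int) fuel result (i : Int)
        = result ++ tailG (pvAlpha.drop i) q (r - i) := by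
  intro j
  induction j with
  | zero =>
    intro i hij result fuel hfuel hlen
    have hi : i = 26 := by omega
    subst hi
    obtain ⟨f, rfl⟩ : ∃ f, fuel = f + 1 := ⟨fuel - 1, by omega⟩
    have hcond : ¬ ((result.length : Int) < ((26 * q + r : Nat) : Int)) := by
      rw [hlen]; push_cast; omega
    have hdrop : pvAlpha.drop 26 = [] := by decide
    rw [solutionLoop]
    rw [if_neg hcond, hdrop]
    simp [tailG]
  | succ j ih =>
    intro i hij result fuel hfuel hlen
    have hi26 : i < 26 := by omega
    obtain ⟨f, rfl⟩ : ∃ f, fuel = f + 1 := ⟨fuel - 1, by omega⟩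
    -- the current letter
    have hlt : i < pvAlpha.length := by rw [show pvAlpha.length = 26 from by decide]; omega
    have hget : PySem.List.pyGet? pvAlpha (i : Int) = some (pvAlpha[i]) := by
      rw [PySem.List.pyGet?_natCast]; exact List.getElem?_eq_getElem hlt
    have hfd : PySem.Int.floordiv ((26 * q + r : Nat) : Int) 26 = ((26 * q + r) / 26 : Nat) :=
      PySem.Int.floordiv_natCast _ _
    have hmd : PySem.Int.mod ((26 * q + r : Nat) : Int) 26 = ((26 * q + r) % 26 : Nat) :=
      PySem.Int.mod_natCast _ _
    have hq : (26 * q + r) / 26 = q := by omega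
    have hr' : (26 * q + r) % 26 = r := by omega
    by_cases hcond : (result.length : Int) < ((26 * q + r : Nat) : Int)
    · -- loop body runs
      have hcnt : (PySem.Int.floordiv ((26 * q + r : Nat) : Int) 26
          + (if (i : Int) < PySem.Int.mod ((26 * q + r : Nat) : Int) 26 then 1 else 0)).toNat
          = q + if i < r then 1 else 0 := by
        rw [hfd, hmd, hq, hr']
        split_ifs with h1 h2 h2
        · simp
        · exact absurd (by exact_mod_cast h1) h2
        · exact absurd (by exact_mod_cast h2) h1
        · simp
      have hdropi : pvAlpha.drop i = pvAlpha[i] :: pvAlpha.drop (i + 1) :=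
        (List.drop_eq_getElem_cons hlt)
      rw [solutionLoop]
      simp only [if_pos hcond, hget, hcnt]
      have hrec := ih (i + 1) (by omega)
        (result ++ List.replicate (q + if i < r then 1 else 0) (pvAlpha[i])) f
        (by omega)
        (by
          simp only [List.length_append, List.length_replicate, hlen]
          have hm : (i + 1) * q = i * q + q := by ring
          rw [hm]
          split_ifs with h <;> omega)
      rw [show ((i : Int) + 1) = ((i + 1 : Nat) : Int) from by push_cast; ring]
      rw [hrec, List.append_assoc, hdropi]
      simp only [tailG]
      rw [show (if i < r then 1 else 0) = (if 0 < r - i then 1 else 0) from by split_ifs <;> omega,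
          show r - (i + 1) = r - i - 1 from by omega]
    · -- loop exits: the remaining blocks are all empty
      have hlen' : (result.length : Int) ≥ ((26 * q + r : Nat) : Int) := le_of_not_gt hcond
      have hge : i * q + min i r ≥ 26 * q + r := by
        rw [hlen] at hlen'; exact_mod_cast hlen'
      -- i < 26 and i*q + min i r ≥ 26q + r forces q = 0 and i ≥ r
      have hq0 : q = 0 ∧ r ≤ i := by
        constructor
        · by_contra hq0
          have h1 : 1 ≤ q := by omega
          have h2 : i * q + min i r < 26 * q + r := by
            have : (26 - i) * 1 ≤ (26 - i) * q := Nat.mul_le_mul_left _ h1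
            have hmul : i * q + (26 - i) * q = 26 * q := by
              rw [← Nat.add_mul]; congr 1; omega
            omega
          omega
        · by_contra hir
          have h2 : min i r = i := by omega
          have h3 : i * q ≤ 26 * q := Nat.mul_le_mul_right _ (by omega)
          omega
      have htg : tailG (pvAlpha.drop i) q (r - i) = [] := by
        rcases hq0 with ⟨rfl, hri⟩
        have hsub : r - i = 0 := by omega
        rw [hsub]
        generalize pvAlpha.drop i = cs
        induction cs with
        | nil => simp [tailG]
        | cons c cs ihc => simpa [tailG] using ihc
      rw [solutionLoop]
      rw [if_neg hcond, htg, List.append_nil]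

theorem pvAlpha_pairwise : pvAlpha.Pairwise (· < ·) := by decide

-- B's sort produces exactly the grouped string
theorem alt_eq_tailG (q r : Nat) :
    PySem.List.sorted ((List.replicate q pvAlpha).flatten ++ pvAlpha.take r) (fun c => c) false
      = tailG pvAlpha q r := by
  apply PySem.List.sorted_id_eq_of_perm_of_pairwise
  · exact tailG_perm pvAlpha q r
  · exact tailG_pairwise pvAlpha q pvAlpha_pairwise r

theorem tailG_len_full (q r : Nat) (hr : r < 26) :
    (tailG pvAlpha q r).length = 26 * q + r := by
  rw [tailG_length]
  rw [show pvAlpha.length = 26 from by decide]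
  omega

-- ===== VERDICT (by name: the statement is the Claim_ definition above) =====
theorem solution_spec : Claim_equal_solution := by
  unfold Claim_equal_solution
  intro N _
  simp only [Spec_solution, solution, solution_alt]
  by_cases hN : N ≤ 0
  · -- loop never runs; B's multiset is empty
    have hmax : max N 0 = 0 := by omega
    have hloop : solutionLoop N 27 [] 0 = [] := by
      rw [solutionLoop]
      rw [if_neg (by simp only [List.length_nil, Int.natCast_zero]; omega)]
    rw [hloop, hmax]
    have hslice : PySem.List.slice ([] : List Char) none (some N) = [] := by
      simp [PySem.List.slice]
    rw [hslice]
    have h0 : PySem.Int.floordiv 0 26 = 0 := by decide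
    have h1 : PySem.Int.mod 0 26 = 0 := by decide
    rw [h0, h1]
    rw [show PySem.List.slice pvAlpha none (some (0:Int)) = [] from by decide]
    decide
  · -- N > 0: both sides are tailG pvAlpha q r
    rw [not_le] at hN
    obtain ⟨n, rfl⟩ : ∃ n : Nat, N = (n : Int) := ⟨N.toNat, (Int.toNat_of_nonneg (by omega)).symm⟩
    set q : Nat := n / 26 with hqdef
    set r : Nat := n % 26 with hrdef
    have hn : n = 26 * q + r := by omega
    have hr : r < 26 := Nat.mod_lt _ (by omega)
    have hmax : max ((n : Int)) 0 = (n : Int) := by omega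
    have hloop : solutionLoop ((n : Int)) 27 [] 0
        = tailG pvAlpha q r := by
      have := loop_invariant q r hr 26 0 (by omega) [] 27 (by omega) (by simp)
      rw [hn] at *
      simpa using this
    rw [hloop, hmax]
    have hfd : PySem.Int.floordiv ((n : Int)) 26 = (q : Int) := by
      exact_mod_cast PySem.Int.floordiv_natCast n 26
    have hmd : PySem.Int.mod ((n : Int)) 26 = (r : Int) := by
      exact_mod_cast PySem.Int.mod_natCast n 26
    rw [hfd, hmd]
    have hsl1 : PySem.List.slice pvAlpha none (some ((r : Nat) : Int)) = pvAlpha.take r :=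
      PySem.List.slice_to_natCast _ _
    have hsl2 : PySem.List.slice (tailG pvAlpha q r) none (some ((n : Nat) : Int))
        = tailG pvAlpha q r := by
      rw [PySem.List.slice_to_natCast, List.take_of_length_le]
      rw [tailG_len_full q r hr]; omega
    rw [hsl1, hsl2, Int.toNat_natCast]
    rw [alt_eq_tailG q r]
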